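-- pv_equiv track=rewrite | github.com/CyberScienceLab/Our-Papers | TrollSleuth/feature_extraction.py | clients_in_tweets
-- ===== SOURCE A (Python) =====
-- def clients_in_tweets(tweets):
--     clients = tweets["tweet_client_name"]
--     web_client = web_app = android = iphone = deck = 0
--     for client in clients:
--         client = str(client).lower()
--         if "deck" in client:
--             deck += 1
--         elif "iphone" in client:
--             iphone += 1
--         elif "android" in client:
--             android += 1
--         elif "web app" in client:
--             web_app += 1
--         elif "web client" in client:
--             web_client += 1
--     return web_client, web_app, android, iphone, deck
-- ===== SOURCE B (Python) =====
-- def clients_in_tweets(tweets):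
--     cs = [str(x).lower() for x in tweets["tweet_client_name"]]
--     deck = sum(1 for c in cs if "deck" in c)
--     iphone = sum(1 for c in cs if "iphone" in c and "deck" not in c)
--     android = sum(1 for c in cs
--                   if "android" in c and "iphone" not in c and "deck" not in c)
--     web_app = sum(1 for c in cs
--                   if "web app" in c and "android" not in c
--                   and "iphone" not in c and "deck" not in c)
--     web_client = sum(1 for c in cs
--                      if "web client" in c and "web app" not in c
--                      and "android" not in c and "iphone" not in c
--                      and "deck" not in c)
--     return web_client, web_app, android, iphone, deck
-- ===== Notes on version B (the rewrite author's own statement) =====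
-- stated objective: alternative
-- what changed: Replaces A's single stateful pass with an if/elif first-match dispatch into five counters by five independent counting passes, one per category, each counting clients containing its keyword and none of the higher-priority keywords (disjointness by predicate, not by control flow).
import Mathlib
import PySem

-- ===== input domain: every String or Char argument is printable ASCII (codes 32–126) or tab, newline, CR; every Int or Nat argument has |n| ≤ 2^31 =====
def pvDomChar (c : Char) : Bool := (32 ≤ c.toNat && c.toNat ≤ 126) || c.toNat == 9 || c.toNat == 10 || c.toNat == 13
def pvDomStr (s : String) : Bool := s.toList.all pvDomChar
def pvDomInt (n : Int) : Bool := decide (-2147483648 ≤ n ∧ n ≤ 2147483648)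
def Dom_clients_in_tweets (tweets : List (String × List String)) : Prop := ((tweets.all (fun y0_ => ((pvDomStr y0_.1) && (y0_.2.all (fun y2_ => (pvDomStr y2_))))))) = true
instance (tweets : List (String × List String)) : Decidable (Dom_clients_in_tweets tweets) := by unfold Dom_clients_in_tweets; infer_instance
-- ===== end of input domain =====

-- B replaces A's single stateful first-match pass by five independent counting
-- passes with mutually exclusive predicates (alternative decomposition, same cost).
-- ===== PORT A =====
-- the body of A's for-loop (the if/elif chain over the five counters)
def pvStepA (acc : Int × Int × Int × Int × Int) (client : String) : Int × Int × Int × Int × Int :=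
  let c := PySem.Str.lower client
  let (web_client, web_app, android, iphone, deck) := acc
  if PySem.Str.isIn "deck" c then (web_client, web_app, android, iphone, deck + 1)
  else if PySem.Str.isIn "iphone" c then (web_client, web_app, android, iphone + 1, deck)
  else if PySem.Str.isIn "android" c then (web_client, web_app, android + 1, iphone, deck)
  else if PySem.Str.isIn "web app" c then (web_client, web_app + 1, android, iphone, deck)
  else if PySem.Str.isIn "web client" c then (web_client + 1, web_app, android, iphone, deck)
  else acc

def clients_in_tweets (tweets : List (String × List String)) : Int × Int × Int × Int × Int :=
  let clients := ((PySem.Dict.mk tweets).get? "tweet_client_name").getD []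
  clients.foldl pvStepA (0, 0, 0, 0, 0)

-- ===== PORT B =====
-- B's five category predicates (on the lowered string)
def pvPdeck (c : String) : Bool := PySem.Str.isIn "deck" c
def pvPiphone (c : String) : Bool := PySem.Str.isIn "iphone" c && !PySem.Str.isIn "deck" c
def pvPandroid (c : String) : Bool :=
  PySem.Str.isIn "android" c && !PySem.Str.isIn "iphone" c && !PySem.Str.isIn "deck" c
def pvPwebapp (c : String) : Bool :=
  PySem.Str.isIn "web app" c && !PySem.Str.isIn "android" c &&
  !PySem.Str.isIn "iphone" c && !PySem.Str.isIn "deck" c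
def pvPwebclient (c : String) : Bool :=
  PySem.Str.isIn "web client" c && !PySem.Str.isIn "web app" c &&
  !PySem.Str.isIn "android" c && !PySem.Str.isIn "iphone" c && !PySem.Str.isIn "deck" c

def clients_in_tweets_alt (tweets : List (String × List String)) : Int × Int × Int × Int × Int :=
  let cs := (((PySem.Dict.mk tweets).get? "tweet_client_name").getD []).map PySem.Str.lower
  let deck : Int := cs.countP pvPdeck
  let iphone : Int := cs.countP pvPiphone
  let android : Int := cs.countP pvPandroid
  let web_app : Int := cs.countP pvPwebapp
  let web_client : Int := cs.countP pvPwebclient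
  (web_client, web_app, android, iphone, deck)

-- ===== PRECONDITION & SPEC =====
-- A raises KeyError when the key "tweet_client_name" is absent; Pre_ requires it present.
def Pre_clients_in_tweets (tweets : List (String × List String)) : Prop :=
  "tweet_client_name" ∈ tweets.map Prod.fst
instance (tweets : List (String × List String)) : Decidable (Pre_clients_in_tweets tweets) := by unfold Pre_clients_in_tweets; infer_instance
def pvWitness_clients_in_tweets : (List (String × List String)) := [("tweet_client_name", ["TweetDeck", "Twitter Web Client"])]
def Spec_clients_in_tweets (tweets : List (String × List String)) (out : Int × Int × Int × Int × Int) : Prop := out = clients_in_tweets_alt tweets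
instance (tweets : List (String × List String)) (out : Int × Int × Int × Int × Int) : Decidable (Spec_clients_in_tweets tweets out) := by unfold Spec_clients_in_tweets; infer_instance

-- ===== CLAIM =====
def Claim_equal_clients_in_tweets : Prop := ∀ (tweets : List (String × List String)), Dom_clients_in_tweets tweets → Pre_clients_in_tweets tweets → Spec_clients_in_tweets tweets (clients_in_tweets tweets)

-- ===== LEMMAS AND PROOFS =====

-- A's fold from any accumulator adds B's five disjoint category counts.
theorem pv_fold (l : List String) (wc wa an ip dk : Int) :
    l.foldl pvStepA (wc, wa, an, ip, dk) =
      (wc + (l.map PySem.Str.lower).countP pvPwebclient,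
       wa + (l.map PySem.Str.lower).countP pvPwebapp,
       an + (l.map PySem.Str.lower).countP pvPandroid,
       ip + (l.map PySem.Str.lower).countP pvPiphone,
       dk + (l.map PySem.Str.lower).countP pvPdeck) := by
  induction l generalizing wc wa an ip dk with
  | nil => simp
  | cons a l ih =>
    simp only [List.foldl_cons, List.map_cons, List.countP_cons]
    by_cases h1 : PySem.Str.isIn "deck" (PySem.Str.lower a) = true <;>
    by_cases h2 : PySem.Str.isIn "iphone" (PySem.Str.lower a) = true <;>
    by_cases h3 : PySem.Str.isIn "android" (PySem.Str.lower a) = true <;>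
    by_cases h4 : PySem.Str.isIn "web app" (PySem.Str.lower a) = true <;>
    by_cases h5 : PySem.Str.isIn "web client" (PySem.Str.lower a) = true <;>
    · simp only [pvStepA, h1, h2, h3, h4, h5, if_true, if_false, Bool.false_eq_true, ih,
        pvPdeck, pvPiphone, pvPandroid, pvPwebapp, pvPwebclient, Bool.not_true, Bool.not_false,
        Bool.and_true, Bool.and_false, Bool.and_self]
      push_cast
      refine Prod.ext ?_ (Prod.ext ?_ (Prod.ext ?_ (Prod.ext ?_ ?_))) <;> simp <;> ring

-- ===== VERDICT =====
theorem clients_in_tweets_spec : Claim_equal_clients_in_tweets := by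
  intro tweets _ _
  show clients_in_tweets tweets = clients_in_tweets_alt tweets
  simp only [clients_in_tweets, clients_in_tweets_alt]
  rw [pv_fold]
  simp
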